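-- pv_equiv track=rewrite | github.com/yanbinglili/COMP472 | vacuun.py | make_grid_from_mask
-- ===== SOURCE A (Python) =====
-- from typing import Tuple, List, Optional
--
-- def make_grid_from_mask(n: int, mask: int) -> List[List[int]]:
--     grid: List[List[int]] = []
--     for r in range(n):
--         row: List[int] = []
--         for c in range(n):
--             idx = r * n + c
--             bit = (mask >> idx) & 1
--             row.append(bit)
--         grid.append(row)
--     return grid
-- ===== SOURCE B (Python) =====
-- from typing import List
--
-- def make_grid_from_mask(n: int, mask: int) -> List[List[int]]:
--     if n <= 0:
--         return []
--     flat = [(mask >> i) & 1 for i in range(n * n)]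
--     return [flat[r * n:(r + 1) * n] for r in range(n)]
-- ===== Notes on version B (the rewrite author's own statement) =====
-- stated objective: alternative
-- what changed: Replaces the nested row/column loops with a single flat bit-extraction pass over range(n*n) followed by slicing the flat list into n rows.
import Mathlib
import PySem

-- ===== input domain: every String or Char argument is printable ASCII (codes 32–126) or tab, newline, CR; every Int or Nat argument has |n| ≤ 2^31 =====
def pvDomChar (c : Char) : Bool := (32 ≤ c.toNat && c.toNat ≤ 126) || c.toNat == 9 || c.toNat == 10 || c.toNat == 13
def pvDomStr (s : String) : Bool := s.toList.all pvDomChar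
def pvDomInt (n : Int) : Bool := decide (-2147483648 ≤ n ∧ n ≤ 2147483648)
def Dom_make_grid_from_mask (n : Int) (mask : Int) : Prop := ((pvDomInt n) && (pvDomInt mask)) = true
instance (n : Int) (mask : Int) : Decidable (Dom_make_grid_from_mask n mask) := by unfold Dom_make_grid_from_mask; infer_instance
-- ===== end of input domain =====

-- B builds one flat list of bits over range(n*n) and slices it into rows, instead of A's nested loops; alternative decomposition, same cost.


-- ===== PORT A =====
-- nested loops: for r in range(n): for c in range(n): row.append((mask >> (r*n+c)) & 1)
-- (the shift amount r*n+c is provably nonnegative inside the loops, so '.toNat' is exact here)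
def make_grid_from_mask (n : Int) (mask : Int) : List (List Int) :=
  (PySem.List.pyRange 0 n 1).foldl
    (fun grid r =>
      grid ++ [(PySem.List.pyRange 0 n 1).foldl
        (fun row c => row ++ [Int.land (Int.shiftRight mask (r * n + c).toNat) 1]) []])
    []

-- ===== PORT B =====
-- flat = [(mask >> i) & 1 for i in range(n*n)]; then rows = [flat[r*n:(r+1)*n] for r in range(n)]
def make_grid_from_mask_alt (n : Int) (mask : Int) : List (List Int) :=
  if n ≤ 0 then [] else
  let flat := (PySem.List.pyRange 0 (n * n) 1).map (fun i => Int.land (Int.shiftRight mask i.toNat) 1)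
  (PySem.List.pyRange 0 n 1).map (fun r => PySem.List.slice flat (some (r * n)) (some ((r + 1) * n)))

-- ===== PRECONDITION & SPEC =====
def Spec_make_grid_from_mask (n : Int) (mask : Int) (out : List (List Int)) : Prop := out = make_grid_from_mask_alt n mask
instance (n : Int) (mask : Int) (out : List (List Int)) : Decidable (Spec_make_grid_from_mask n mask out) := by unfold Spec_make_grid_from_mask; infer_instance

-- ===== CLAIM (what is proved, stated in full; the proofs are below) =====
def Claim_equal_make_grid_from_mask : Prop := ∀ (n : Int) (mask : Int), Dom_make_grid_from_mask n mask → Spec_make_grid_from_mask n mask (make_grid_from_mask n mask)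

-- ===== LEMMAS AND PROOFS =====

-- one row of B (a slice of the flat list) equals the corresponding inner loop of A
lemma row_eq (n mask r : Int) (hr0 : 0 ≤ r) (hrn : r < n) :
    PySem.List.slice ((PySem.List.pyRange 0 (n * n) 1).map (fun i => Int.land (Int.shiftRight mask i.toNat) 1))
        (some (r * n)) (some ((r + 1) * n))
      = (PySem.List.pyRange 0 n 1).map (fun c => Int.land (Int.shiftRight mask (r * n + c).toNat) 1) := by
  have hn : 0 < n := lt_of_le_of_lt hr0 hrn
  have h1 : (0:Int) ≤ r * n := mul_nonneg hr0 hn.le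
  have h2 : (0:Int) ≤ (r + 1) * n := mul_nonneg (by omega) hn.le
  rw [PySem.List.slice_toNat _ h1 h2, PySem.List.pyRange_one, PySem.List.pyRange_one]
  apply List.ext_getElem
  · simp only [List.length_take, List.length_drop, List.length_map, List.length_range]
    have hle : r * n + n ≤ n * n := by nlinarith
    have : ((r + 1) * n).toNat = (r * n).toNat + n.toNat := by
      have : (r + 1) * n = r * n + n := by ring
      omega
    omega
  · intro k hk hk'
    have hkn : k < n.toNat := by
      simp only [List.length_map, List.length_range] at hk'
      omega
    have hlen : (r * n).toNat + k < (n * n - 0).toNat := by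
      have : r * n + n ≤ n * n := by nlinarith
      omega
    simp only [List.getElem_take, List.getElem_drop, List.getElem_map, List.getElem_range]
    congr 3
    omega

lemma grid_eq (n mask : Int) : make_grid_from_mask n mask = make_grid_from_mask_alt n mask := by
  unfold make_grid_from_mask make_grid_from_mask_alt
  by_cases hn : n ≤ 0
  · simp [hn, PySem.List.pyRange_one_eq_nil hn]
  simp only [if_neg hn]
  rw [PySem.List.foldl_append_singleton_eq_map]
  apply List.map_congr_left
  intro r hr
  rw [PySem.List.mem_pyRange_one] at hr
  rw [PySem.List.foldl_append_singleton_eq_map, row_eq n mask r hr.1 hr.2]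
  simp

-- ===== VERDICT (by name: the statement is the Claim_ definition above) =====
theorem make_grid_from_mask_spec : Claim_equal_make_grid_from_mask := by
  intro n mask _
  exact grid_eq n mask
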